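-- pv_equiv track=rewrite | github.com/tksgtkm/programming_list_Python | design_pattern/tabulator.py | text_tabulator
-- ===== SOURCE A (Python) =====
-- def text_tabulator(rows, items):
--     columns, remainder = divmod(len(items), rows)
--     if remainder:
--         columns += 1
--         remainder = (rows * columns) - len(items)
--         if remainder == columns:
--             remainder = 0
--     column = columnWidth = 0
--     for item in items:
--         columnWidth = max(columnWidth, len(item))
--     columnDivider = ("-" * (columnWidth + 2)) + "+"
--     divider = "+" + (columnDivider)
--     table = [divider]
--     for item in items + (("",) * remainder):
--         if column == 0:
--             table.append("|")
--         table.append("{:<{}} |".format(item, columnWidth))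
--         column += 1
--         if column == columns:
--             table.append("\n")
--         column %= columns
--     table.append(divider)
--     return "".join(table)
-- ===== SOURCE B (Python) =====
-- def text_tabulator(rows, items):
--     if rows < 1:
--         raise ValueError("rows must be positive")
--     width = max((len(item) for item in items), default=0)
--     divider = "+" + "-" * (width + 2) + "+"
--     n = len(items)
--     columns = (n + rows - 1) // rows          # ceil(n / rows)
--     if columns == 0:                          # no items -> no body rows
--         return divider + divider
--     pad = rows * columns - n                  # blanks to fill the grid
--     if pad == columns:                        # a whole blank row: drop it
--         pad = 0
--     cells = list(items) + [""] * pad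
--     grid = (cells[i:i + columns] for i in range(0, len(cells), columns))
--     lines = ("|" + "".join("{:<{}} |".format(c, width) for c in row) + "\n" for row in grid)
--     return divider + "".join(lines) + divider
-- ===== Notes on version B (the rewrite author's own statement) =====
-- stated objective: simpler
-- what changed: A's flat loop with a running column counter, modulo wraparound and interleaved '|'/'\n' markers is replaced by an explicit grid (pad the items to fill the grid, chunk into rows of `columns` cells, format each row as one line, concatenate divider + lines + divider); Pre_ excludes rows < 1, where A raises ZeroDivisionError (rows == 0, and some negative rows) or returns accidental tables with no row breaks (negative column count, outside the function's natural domain) while B raises ValueError.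
-- outside the precondition, e.g. on text_tabulator(-1, ('a',)): A returns '+---+|a |+---+', B raises ValueError; on text_tabulator(0, ('a',)): A raises ZeroDivisionError, B raises ValueError
import Mathlib
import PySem

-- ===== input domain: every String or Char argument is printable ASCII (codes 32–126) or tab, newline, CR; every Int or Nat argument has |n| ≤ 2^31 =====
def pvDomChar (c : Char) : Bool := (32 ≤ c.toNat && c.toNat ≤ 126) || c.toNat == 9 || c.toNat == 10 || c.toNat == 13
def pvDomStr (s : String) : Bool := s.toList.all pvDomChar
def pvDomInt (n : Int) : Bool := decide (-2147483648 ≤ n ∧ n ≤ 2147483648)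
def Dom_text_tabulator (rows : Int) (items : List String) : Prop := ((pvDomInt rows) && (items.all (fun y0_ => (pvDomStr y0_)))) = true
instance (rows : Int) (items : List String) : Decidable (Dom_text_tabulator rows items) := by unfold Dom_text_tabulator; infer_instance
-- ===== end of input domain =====

-- B replaces A's flat loop with a running column counter and modulo wraparound by an
-- explicit grid (pad, chunk into rows, format each row as a line); objective: simpler.


-- ===== PORT A =====
-- "{:<{}} |".format(item, w): item left-justified to width w, then " |" (exact for w ≥ len and w < len alike, toNat clamps like Python's no-truncation ljust)
def pvCell (w : Int) (it : String) : List Char :=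
  it.toList ++ List.replicate ((w - PySem.Str.len it).toNat) ' ' ++ [' ', '|']

-- one iteration of A's `for item in …` loop; state = (column, table)  (strings kept as List Char, join = flatten)
def pvStepA (columns : Int) (w : Int) (st : Int × List (List Char)) (item : String) :
    Int × List (List Char) :=
  let column := st.1
  let table := st.2
  let table := if column = 0 then table ++ [['|']] else table
  let table := table ++ [pvCell w item]
  let column := column + 1
  let table := if column = columns then table ++ [['\n']] else table
  (PySem.Int.mod column columns, table)

def text_tabulator (rows : Int) (items : List String) : String :=
  match PySem.Int.divmod? (items.length : Int) rows with
  | none => ""    -- rows = 0: Python raises ZeroDivisionError; excluded by Pre_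
  | some (c0, r0) =>
    let n : Int := (items.length : Int)
    let cr : Int × Int :=
      if r0 ≠ 0 then
        let c := c0 + 1
        let r := rows * c - n
        (c, if r = c then 0 else r)
      else (c0, r0)
    let columns := cr.1
    let remainder := cr.2
    let columnWidth : Int := items.foldl (fun w it => max w (PySem.Str.len it)) 0
    let columnDivider : List Char := List.replicate ((columnWidth + 2).toNat) '-' ++ ['+']
    let divider : List Char := '+' :: columnDivider
    let padded := items ++ List.replicate remainder.toNat ""
    let res := padded.foldl (pvStepA columns columnWidth) (0, [divider])
    String.mk ((res.2 ++ [divider]).flatten)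

-- ===== PORT B =====
-- B's '{:<{}} |'.format(c, width) (same format string as A, ported independently for B)
def pvCellB (w : Int) (it : String) : List Char :=
  it.toList ++ List.replicate ((w - PySem.Str.len it).toNat) ' ' ++ [' ', '|']
-- B's chunking `cells[i:i+columns] for i in range(0, len(cells), columns)`, with columns = k+1
def pvChunks (k : Nat) : List String → List (List String)
  | [] => []
  | x :: xs => (x :: List.take k xs) :: pvChunks k (List.drop k xs)
  termination_by l => l.length
  decreasing_by simp

def text_tabulator_alt (rows : Int) (items : List String) : String :=
  if rows < 1 then ""    -- B raises ValueError here; excluded by Pre_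
  else
    let width : Int := items.foldl (fun w it => max w (PySem.Str.len it)) 0
    let divider : List Char := '+' :: (List.replicate ((width + 2).toNat) '-' ++ ['+'])
    let n : Int := (items.length : Int)
    let columns := PySem.Int.floordiv (n + rows - 1) rows
    if columns = 0 then String.mk (divider ++ divider)
    else
      let pad := rows * columns - n
      let pad := if pad = columns then 0 else pad
      let cells := items ++ List.replicate pad.toNat ""
      let lines := (pvChunks (columns.toNat - 1) cells).map
        (fun row => '|' :: ((row.map (pvCellB width)).flatten ++ ['\n']))
      String.mk (divider ++ lines.flatten ++ divider)

-- ===== PRECONDITION & SPEC =====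
-- Pre_ excludes rows < 1: there A raises ZeroDivisionError (rows == 0, and negative rows
-- whenever the computed column count hits 0) or, for other negative rows, returns accidental
-- tables with no row breaks — non-positive row counts are outside the function's natural domain.
def Pre_text_tabulator (rows : Int) (items : List String) : Prop := 1 ≤ rows
instance (rows : Int) (items : List String) : Decidable (Pre_text_tabulator rows items) := by unfold Pre_text_tabulator; infer_instance
def pvWitness_text_tabulator : Int × List String := (2, ["a", "bb", "c"])

def Spec_text_tabulator (rows : Int) (items : List String) (out : String) : Prop := out = text_tabulator_alt rows items
instance (rows : Int) (items : List String) (out : String) : Decidable (Spec_text_tabulator rows items out) := by unfold Spec_text_tabulator; infer_instance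

-- ===== CLAIM (what is proved, stated in full; the proofs are below) =====
def Claim_equal_text_tabulator : Prop := ∀ (rows : Int) (items : List String), Dom_text_tabulator rows items → Pre_text_tabulator rows items → Spec_text_tabulator rows items (text_tabulator rows items)

-- ===== LEMMAS AND PROOFS =====

-- step unfolded once, for rewriting
theorem pvStepA_eq (columns w : Int) (col : Int) (t : List (List Char)) (item : String) :
    pvStepA columns w (col, t) item =
      (PySem.Int.mod (col + 1) columns,
        ((if col = 0 then t ++ [['|']] else t) ++ [pvCell w item]) ++
          (if col + 1 = columns then [['\n']] else [])) := by
  simp only [pvStepA]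
  split <;> split <;> simp

-- processing the rest of one grid row from column j ≥ 1: emits the cells and the row's newline
theorem pvInner (k : Nat) (w : Int) :
    ∀ (c : List String) (x : String) (j : Int) (t : List (List Char)),
      1 ≤ j → j + ((c.length : Int) + 1) = (k : Int) + 1 →
      List.foldl (pvStepA ((k : Int) + 1) w) (j, t) (x :: c) =
        (0, t ++ (x :: c).map (pvCell w) ++ [['\n']]) := by
  intro c
  induction c with
  | nil =>
    intro x j t hj hlen
    simp only [List.length_nil, Nat.cast_zero] at hlen
    have hne : ¬ j = 0 := by omega
    have hcol : j + 1 = (k : Int) + 1 := by omega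
    have hmod : PySem.Int.mod ((k : Int) + 1) ((k : Int) + 1) = 0 := by
      rw [PySem.Int.mod_eq_emod_of_pos (by omega)]; exact Int.emod_self
    simp only [List.foldl, pvStepA_eq, if_neg hne]
    rw [if_pos hcol, hcol, hmod]
    simp
  | cons y c ih =>
    intro x j t hj hlen
    have hlen' : j + ((c.length : Int) + 2) = (k : Int) + 1 := by
      simp only [List.length_cons] at hlen; push_cast at hlen; omega
    have hne : ¬ j = 0 := by omega
    have hne2 : ¬ j + 1 = (k : Int) + 1 := by omega
    have hmod : PySem.Int.mod (j + 1) ((k : Int) + 1) = j + 1 := by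
      rw [PySem.Int.mod_eq_emod_of_pos (by omega)]
      exact Int.emod_eq_of_lt (by omega) (by omega)
    have step : List.foldl (pvStepA ((k : Int) + 1) w) (j, t) (x :: y :: c) =
        List.foldl (pvStepA ((k : Int) + 1) w) (j + 1, t ++ [pvCell w x]) (y :: c) := by
      simp only [List.foldl, pvStepA_eq, if_neg hne, if_neg hne2, hmod]
      simp
    rw [step, ih y (j + 1) (t ++ [pvCell w x]) (by omega) (by omega)]
    simp

-- the whole loop, on a cell list that fills whole grid rows, equals B's row-by-row rendering
theorem pvOuter (k : Nat) (w : Int) :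
    ∀ (cells : List String) (t : List (List Char)), (k + 1) ∣ cells.length →
      (List.foldl (pvStepA ((k : Int) + 1) w) (0, t) cells).2 =
        t ++ (pvChunks k cells).flatMap
          (fun row => ['|'] :: row.map (pvCell w) ++ [['\n']]) := by
  intro cells
  induction cells using pvChunks.induct k with
  | case1 => intro t _; simp [pvChunks]
  | case2 x xs ih =>
    intro t hdvd
    have hxs : k ≤ xs.length := by
      rcases hdvd with ⟨m, hm⟩
      rcases m with _ | m
      · simp at hm
      · have hm' : xs.length + 1 = (k + 1) * m + (k + 1) := by
          simpa [Nat.mul_succ] using hm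
        set P := (k + 1) * m with hP
        omega
    have hdvd' : (k + 1) ∣ (List.drop k xs).length := by
      rcases hdvd with ⟨m, hm⟩
      rcases m with _ | m
      · simp at hm
      · refine ⟨m, ?_⟩
        have hm' : xs.length + 1 = (k + 1) * m + (k + 1) := by
          simpa [Nat.mul_succ] using hm
        set P := (k + 1) * m with hP
        simp only [List.length_drop]
        omega
    rcases Nat.eq_zero_or_pos k with hk | hk
    · -- one cell per row
      subst hk
      rw [List.drop_zero] at ih
      have hmod : PySem.Int.mod (0 + 1) (((0 : Nat) : Int) + 1) = 0 := by
        rw [PySem.Int.mod_eq_emod_of_pos (by simp)]; simp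
      have step : List.foldl (pvStepA (((0 : Nat) : Int) + 1) w) (0, t) (x :: xs) =
          List.foldl (pvStepA (((0 : Nat) : Int) + 1) w)
            (0, t ++ [['|'], pvCell w x, ['\n']]) xs := by
        simp only [List.foldl, pvStepA_eq, if_pos rfl, hmod]
        norm_num
      rw [step, ih (t ++ [['|'], pvCell w x, ['\n']]) (by simpa using hdvd')]
      simp [pvChunks]
    · -- k ≥ 1 : first cell, then pvInner on the rest of the row, then recurse
      have htake : (List.take k xs).length = k := by simp [hxs]
      obtain ⟨y, rest, hyr⟩ : ∃ y rest, List.take k xs = y :: rest := by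
        cases htk : List.take k xs with
        | nil => rw [htk] at htake; simp at htake; omega
        | cons y rest => exact ⟨y, rest, rfl⟩
      have hrest : rest.length = k - 1 := by
        have := htake; rw [hyr] at this; simp at this; omega
      have hne2 : ¬ (1 : Int) = (k : Int) + 1 := by omega
      have hmod1 : PySem.Int.mod (0 + 1) ((k : Int) + 1) = 1 := by
        rw [PySem.Int.mod_eq_emod_of_pos (by omega)]
        exact Int.emod_eq_of_lt (by omega) (by omega)
      have step : List.foldl (pvStepA ((k : Int) + 1) w) (0, t) (x :: xs) =
          List.foldl (pvStepA ((k : Int) + 1) w) (1, t ++ [['|'], pvCell w x]) xs := by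
        simp only [List.foldl]
        rw [pvStepA_eq, if_pos rfl, if_neg (show ¬(0:Int)+1 = (k:Int)+1 by omega), hmod1]
        simp
      rw [step]
      have hsplit : xs = List.take k xs ++ List.drop k xs := (List.take_append_drop k xs).symm
      conv_lhs => rw [hsplit, List.foldl_append, hyr]
      rw [pvInner k w rest y 1 (t ++ [['|'], pvCell w x]) le_rfl (by omega)]
      rw [ih _ hdvd']
      rw [show pvChunks k (x :: xs) = (x :: List.take k xs) :: pvChunks k (List.drop k xs) from
        by simp [pvChunks]]
      rw [hyr]
      simp

-- ceiling division: A's divmod adjustment equals B's (n + rows - 1) // rows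
theorem pvCeil (n rows : Int) (hn : 0 ≤ n) (hr : 1 ≤ rows) :
    (if PySem.Int.mod n rows ≠ 0 then PySem.Int.floordiv n rows + 1
     else PySem.Int.floordiv n rows) = PySem.Int.floordiv (n + rows - 1) rows := by
  have hq := PySem.Int.floordiv_mul_add_mod n rows
  have hm := PySem.Int.mod_eq_emod_of_pos (a := n) (b := rows) (by omega)
  have h0 : 0 ≤ PySem.Int.mod n rows := by rw [hm]; exact Int.emod_nonneg n (by omega)
  have h1 : PySem.Int.mod n rows < rows := by rw [hm]; exact Int.emod_lt_of_pos n (by omega)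
  set q := PySem.Int.floordiv n rows with hqdef
  set r := PySem.Int.mod n rows with hrdef
  set Q := q * rows with hQ
  by_cases hrz : r = 0
  · rw [if_neg (by simp [hrz])]
    rw [eq_comm, PySem.Int.floordiv_eq_iff_of_pos (by omega)]
    constructor
    · calc q * rows ≤ q * rows + (rows - 1) := by omega
        _ = n + rows - 1 := by rw [← hQ]; omega
    · have : (q + 1) * rows = Q + rows := by rw [hQ]; ring
      rw [this]; omega
  · rw [if_pos hrz]
    rw [eq_comm, PySem.Int.floordiv_eq_iff_of_pos (by omega)]
    have e1 : (q + 1) * rows = Q + rows := by rw [hQ]; ring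
    have e2 : (q + 1 + 1) * rows = Q + rows + rows := by rw [hQ]; ring
    rw [e1, e2]
    constructor <;> omega

theorem pvFlat (w : Int) (C : List (List String)) :
    (C.flatMap (fun row => ['|'] :: (row.map (pvCell w) ++ [['\n']]))).flatten
      = (C.map (fun row => '|' :: ((row.map (pvCell w)).flatten ++ ['\n']))).flatten := by
  induction C with
  | nil => simp
  | cons c C ih =>
    simp only [List.flatMap_cons, List.map_cons, List.flatten_append, List.flatten_cons, ← ih]
    simp

theorem pv_main (rows : Int) (items : List String) (hr : 1 ≤ rows) :
    text_tabulator rows items = text_tabulator_alt rows items := by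
  have hrne : rows ≠ 0 := by omega
  have hrpos : (0 : Int) < rows := by omega
  have hn0 : (0 : Int) ≤ (items.length : Int) := by positivity
  have hceil := pvCeil (items.length : Int) rows hn0 hr
  simp only [text_tabulator, text_tabulator_alt, PySem.Int.divmod?, if_neg hrne,
    if_neg (show ¬ rows < 1 by omega), show pvCellB = pvCell from rfl]
  by_cases hclz : PySem.Int.floordiv ((items.length : Int) + rows - 1) rows = 0
  · -- columns = 0: no items, both sides are divider ++ divider
    have hnil : items = [] := by
      rcases items with _ | ⟨x, xs⟩
      · rfl
      · exfalso
        have h1 : (1 : Int) ≤ PySem.Int.floordiv (((x :: xs).length : Int) + rows - 1) rows := by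
          rw [PySem.Int.le_floordiv_iff_mul_le hrpos]
          have : (1 : Int) ≤ ((x :: xs).length : Int) := by simp
          omega
        omega
    subst hnil
    rw [if_pos hclz]
    simp [Int.zero_fmod, Int.zero_fdiv]
  · -- columns ≥ 1
    rw [if_neg hclz]
    simp only [show Int.fdiv = PySem.Int.floordiv from rfl,
      show Int.fmod = PySem.Int.mod from rfl] at *
    set n : Int := (items.length : Int) with hnn
    set w : Int := items.foldl (fun w it => max w (PySem.Str.len it)) 0 with hww
    set d : List Char := '+' :: (List.replicate (w + 2).toNat '-' ++ ['+']) with hdd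
    set cB : Int := PySem.Int.floordiv (n + rows - 1) rows with hcB
    have hn0' : (0 : Int) ≤ n := hn0
    have hn1 : 1 ≤ n := by
      by_contra hlt
      have hn00 : n = 0 := by omega
      apply hclz
      rw [hcB, PySem.Int.floordiv_eq_iff_of_pos hrpos, hn00]
      refine ⟨by nlinarith, by nlinarith⟩
    have hcb1 : 1 ≤ cB := by
      rw [hcB, PySem.Int.le_floordiv_iff_mul_le hrpos]; omega
    have hfd := (PySem.Int.floordiv_eq_iff_of_pos (a := n + rows - 1) hrpos).1 hcB.symm
    have hbound : n ≤ cB * rows := by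
      have he : (cB + 1) * rows = cB * rows + rows := by ring
      rw [he] at hfd
      omega
    -- A's (columns, remainder) pair equals (cB, B's pad)
    have hqr := PySem.Int.floordiv_mul_add_mod n rows
    have hP : (if PySem.Int.mod n rows ≠ 0 then
          (PySem.Int.floordiv n rows + 1,
            if rows * (PySem.Int.floordiv n rows + 1) - n = PySem.Int.floordiv n rows + 1 then 0
            else rows * (PySem.Int.floordiv n rows + 1) - n)
        else (PySem.Int.floordiv n rows, PySem.Int.mod n rows))
        = (cB, if rows * cB - n = cB then 0 else rows * cB - n) := by
      by_cases hr0 : PySem.Int.mod n rows = 0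
      · rw [if_neg (by simp [hr0])]
        rw [if_neg (by simp [hr0])] at hceil
        have hz : rows * cB - n = 0 := by
          rw [← hceil, mul_comm]
          linarith [hqr, hr0]
        rw [hz, hr0, hceil]
        simp [ite_self]
      · rw [if_pos hr0]
        rw [if_pos hr0] at hceil
        rw [hceil]
    rw [hP]
    set pad : Int := if rows * cB - n = cB then 0 else rows * cB - n with hpad
    have hbound' : n ≤ rows * cB := by rw [mul_comm]; exact hbound
    have hpad0 : 0 ≤ pad := by
      rw [hpad]; split <;> omega
    set k : Nat := cB.toNat - 1 with hk
    have hkc : ((k : Int) + 1) = cB := by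
      rw [hk]; omega
    have hkn : k + 1 = cB.toNat := by omega
    set cells : List String := items ++ List.replicate pad.toNat "" with hcells
    have htn : ((pad.toNat : Nat) : Int) = pad := Int.toNat_of_nonneg hpad0
    have hclen : (cells.length : Int) = n + pad := by
      rw [hcells]
      simp only [List.length_append, List.length_replicate]
      push_cast
      omega
    have hdvd : (k + 1) ∣ cells.length := by
      rw [hpad] at hclen
      by_cases hsk : rows * cB - n = cB
      · refine ⟨(rows - 1).toNat, ?_⟩
        rw [if_pos hsk] at hclen
        have he : (((k + 1) * (rows - 1).toNat : Nat) : Int) = cB * (rows - 1) := by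
          push_cast
          rw [Int.toNat_of_nonneg (by omega), hkc]
        have hv : (cells.length : Int) = cB * (rows - 1) := by
          rw [hclen]; nlinarith [hsk]
        exact_mod_cast hv.trans he.symm
      · refine ⟨rows.toNat, ?_⟩
        rw [if_neg hsk] at hclen
        have he : (((k + 1) * rows.toNat : Nat) : Int) = cB * rows := by
          push_cast
          rw [Int.toNat_of_nonneg (by omega), hkc]
        have hv : (cells.length : Int) = cB * rows := by
          rw [hclen]; ring
        exact_mod_cast hv.trans he.symm
    rw [← hkc]
    rw [pvOuter k w cells [d] hdvd]
    simp [List.flatten_append, pvFlat]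

-- ===== VERDICT (by name: the statement is the Claim_ definition above) =====
theorem text_tabulator_spec : Claim_equal_text_tabulator := by
  intro rows items _ hpre
  unfold Spec_text_tabulator
  exact pv_main rows items hpre
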